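-- pv_equiv track=rewrite | github.com/sxLii/cli-anything-swmm | cli_anything/swmm/core/rules.py | _split_into_blocks
-- ===== SOURCE A (Python) =====
-- def _is_comment(line: str) -> bool:
--     s = line.strip()
--     return not s or s.startswith(";;")
--
-- def _split_into_blocks(section_lines: list[str]) -> tuple[list[str], list[list[str]]]:
--     """Split section lines into (header_comments, list_of_rule_line_blocks)."""
--     header: list[str] = []
--     blocks: list[list[str]] = []
--     current: list[str] | None = None
--
--     for line in section_lines:
--         stripped = line.strip()
--         if _is_comment(line) and current is None:
--             header.append(line)
--             continue
--
--         upper = stripped.upper()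
--         if upper.startswith("RULE ") or upper == "RULE":
--             if current is not None:
--                 blocks.append(current)
--             current = [line]
--         elif current is not None:
--             current.append(line)
--         # Orphan comment/blank lines between rules go to header
--
--     if current is not None:
--         blocks.append(current)
--
--     return header, blocks
-- ===== SOURCE B (Python) =====
-- def _is_comment(line: str) -> bool:
--     s = line.strip()
--     return not s or s.startswith(";;")
--
-- def _is_rule(line: str) -> bool:
--     u = line.strip().upper()
--     return u.startswith("RULE ") or u == "RULE"
--
-- def _split_into_blocks(section_lines: list[str]) -> tuple[list[str], list[list[str]]]:
--     """Two-phase split: first scan to the first RULE line, then slice off one block per RULE."""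
--     rest = list(section_lines)
--     pre = []
--     while rest and not _is_rule(rest[0]):
--         pre.append(rest.pop(0))
--     header = [l for l in pre if _is_comment(l)]
--     blocks = []
--     while rest:
--         blk = [rest.pop(0)]
--         while rest and not _is_rule(rest[0]):
--             blk.append(rest.pop(0))
--         blocks.append(blk)
--     return header, blocks
-- ===== Notes on version B (the rewrite author's own statement) =====
-- stated objective: alternative
-- what changed: Replaces A's single-pass state machine (header/blocks/current accumulator with per-line case analysis) by a two-phase partition: scan to the first RULE line, filter comments from that prefix for the header, then slice off one block per RULE line.
import Mathlib
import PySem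

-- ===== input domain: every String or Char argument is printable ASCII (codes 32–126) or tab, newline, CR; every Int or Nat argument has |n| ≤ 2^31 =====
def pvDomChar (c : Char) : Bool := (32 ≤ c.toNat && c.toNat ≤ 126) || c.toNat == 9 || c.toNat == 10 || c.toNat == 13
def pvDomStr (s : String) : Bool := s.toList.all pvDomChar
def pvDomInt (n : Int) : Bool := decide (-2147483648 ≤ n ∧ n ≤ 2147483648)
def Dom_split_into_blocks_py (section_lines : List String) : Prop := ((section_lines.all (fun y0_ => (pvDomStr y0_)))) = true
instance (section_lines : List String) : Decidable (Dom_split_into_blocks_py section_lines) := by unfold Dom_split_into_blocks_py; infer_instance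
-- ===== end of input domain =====

-- B replaces A's single-pass state machine (header/blocks/current accumulator) by a two-phase
-- split: scan to the first RULE line, filter comments for the header, then slice one block per
-- RULE line.  Objective: alternative decomposition; same cost.

-- ===== PORT A =====
def pvIsComment (line : String) : Bool :=
  let s := PySem.Str.strip line
  (PySem.Str.len s == 0) || PySem.Str.startswith s ";;"

-- A computes `upper = stripped.upper()` and tests it; factored here as a helper (same values)
def pvIsRule (line : String) : Bool :=
  let u := PySem.Str.upper (PySem.Str.strip line)
  PySem.Str.startswith u "RULE " || (u == "RULE")

def pvStepA (st : List String × List (List String) × Option (List String)) (line : String) :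
    List String × List (List String) × Option (List String) :=
  let (header, blocks, current) := st
  if pvIsComment line && current.isNone then (header ++ [line], blocks, current)
  else if pvIsRule line then
    (header, (match current with | some c => blocks ++ [c] | none => blocks), some [line])
  else match current with
    | some c => (header, blocks, some (c ++ [line]))
    | none => (header, blocks, none)

def pvFinishA (st : List String × List (List String) × Option (List String)) :
    List String × List (List String) :=
  match st with
  | (header, blocks, some c) => (header, blocks ++ [c])
  | (header, blocks, none) => (header, blocks)

def split_into_blocks_py (section_lines : List String) : List String × List (List String) :=
  pvFinishA (section_lines.foldl pvStepA ([], [], none))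

-- ===== PORT B =====
-- the inner while loop of Source B: one block = the RULE line plus everything up to the next RULE line
def pvChunks (ls : List String) : List (List String) :=
  match ls with
  | [] => []
  | r :: rest =>
    (r :: rest.takeWhile (fun l => !pvIsRule l)) :: pvChunks (rest.dropWhile (fun l => !pvIsRule l))
termination_by ls.length
decreasing_by simpa using Nat.lt_succ_of_le (List.length_dropWhile_le _ _)

def split_into_blocks_py_alt (section_lines : List String) : List String × List (List String) :=
  let pre := section_lines.takeWhile (fun l => !pvIsRule l)
  (pre.filter pvIsComment, pvChunks (section_lines.dropWhile (fun l => !pvIsRule l)))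

-- ===== PRECONDITION & SPEC =====
def Spec_split_into_blocks_py (section_lines : List String) (out : List String × List (List String)) : Prop := out = split_into_blocks_py_alt section_lines
instance (section_lines : List String) (out : List String × List (List String)) : Decidable (Spec_split_into_blocks_py section_lines out) := by unfold Spec_split_into_blocks_py; infer_instance

-- ===== CLAIM (what is proved, stated in full; the proofs are below) =====
def Claim_equal_split_into_blocks_py : Prop := ∀ (section_lines : List String), Dom_split_into_blocks_py section_lines → Spec_split_into_blocks_py section_lines (split_into_blocks_py section_lines)

-- ===== LEMMAS AND PROOFS =====

-- string-literal characters, pre-reduced so simp never unfolds String.toList mid-proof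
theorem pvUpSemi : PySem.Chars.upperChar ';' = ';' := by decide
theorem pvRuleSpList : "RULE ".toList = ['R', 'U', 'L', 'E', ' '] := rfl
theorem pvRuleList : "RULE".toList = ['R', 'U', 'L', 'E'] := rfl

-- a comment line (blank or starting ";;") is never a RULE line
theorem pvIsRule_of_comment (line : String) (h : pvIsComment line = true) :
    pvIsRule line = false := by
  simp only [pvIsComment, Bool.or_eq_true, beq_iff_eq] at h
  have hhead : (PySem.Str.strip line).toList = [] ∨
      ∃ t, (PySem.Str.strip line).toList = ';' :: ';' :: t := by
    rcases h with h | h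
    · left; simpa [PySem.Str.len] using h
    · right
      rcases (PySem.Chars.startswith_iff _ _).1 (by simpa using h) with ⟨t, ht⟩
      exact ⟨t, by rw [PySem.Str.toList_strip, ← ht]; rfl⟩
  have hu : (PySem.Str.upper (PySem.Str.strip line)).toList = [] ∨
      ∃ t, (PySem.Str.upper (PySem.Str.strip line)).toList = ';' :: ';' :: t := by
    rcases hhead with hs | ⟨t, hs⟩
    · left; rw [PySem.Str.toList_upper, hs]; rfl
    · right
      exact ⟨PySem.Chars.upper t, by
        rw [PySem.Str.toList_upper, hs]; simp [PySem.Chars.upper, pvUpSemi]⟩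
  simp only [pvIsRule, Bool.or_eq_false_iff]
  constructor
  · cases hsw : PySem.Str.startswith (PySem.Str.upper (PySem.Str.strip line)) "RULE " with
    | false => rfl
    | true =>
      exfalso
      have hpre : ("RULE ".toList) <+: (PySem.Str.upper (PySem.Str.strip line)).toList :=
        (PySem.Chars.startswith_iff _ _).1 (by simpa using hsw)
      rcases hu with hs | ⟨t, hs⟩ <;> rw [hs, pvRuleSpList] at hpre
      · exact absurd (List.prefix_nil.mp hpre) (by simp)
      · rcases hpre with ⟨s, hps⟩
        have : 'R' = ';' := by simpa using congrArg (fun l => l.head?) hps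
        exact absurd this (by decide)
  · rw [beq_eq_false_iff_ne]
    intro heq
    rw [heq] at hu
    rcases hu with hs | ⟨t, hs⟩ <;> rw [pvRuleList] at hs
    · simp at hs
    · have : 'R' = ';' := by simpa using congrArg (fun l => l.head?) hs
      exact absurd this (by decide)

-- invariant of A's fold, against B's two-phase shape
theorem pvMainA (ls : List String) :
    ∀ (h : List String) (bs : List (List String)) (cur : Option (List String)),
    pvFinishA (ls.foldl pvStepA (h, bs, cur)) =
      match cur with
      | none => (h ++ (ls.takeWhile (fun l => !pvIsRule l)).filter pvIsComment,
                 bs ++ pvChunks (ls.dropWhile (fun l => !pvIsRule l)))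
      | some c => (h, bs ++ (c ++ ls.takeWhile (fun l => !pvIsRule l)) ::
                 pvChunks (ls.dropWhile (fun l => !pvIsRule l))) := by
  induction ls with
  | nil =>
    intro h bs cur
    cases cur <;> simp [pvFinishA, pvChunks]
  | cons l ls ih =>
    intro h bs cur
    rw [List.foldl_cons]
    by_cases hr : pvIsRule l = true
    · have hc : pvIsComment l = false := by
        cases hcl : pvIsComment l
        · rfl
        · exact absurd hr (by simp [pvIsRule_of_comment l hcl])
      cases cur with
      | none =>
        rw [show pvStepA (h, bs, none) l = (h, bs, some [l]) by
          simp [pvStepA, hc, hr]]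
        rw [ih h bs (some [l])]
        simp [hr, pvChunks]
      | some c =>
        rw [show pvStepA (h, bs, some c) l = (h, bs ++ [c], some [l]) by
          simp [pvStepA, hc, hr]]
        rw [ih h (bs ++ [c]) (some [l])]
        simp [hr, pvChunks]
    · have hr' : pvIsRule l = false := by simpa using hr
      cases cur with
      | none =>
        cases hcl : pvIsComment l
        · rw [show pvStepA (h, bs, none) l = (h, bs, none) by
            simp [pvStepA, hcl, hr']]
          rw [ih h bs none]
          simp [hr', hcl]
        · rw [show pvStepA (h, bs, none) l = (h ++ [l], bs, none) by
            simp [pvStepA, hcl]]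
          rw [ih (h ++ [l]) bs none]
          simp [hr', hcl]
      | some c =>
        rw [show pvStepA (h, bs, some c) l = (h, bs, some (c ++ [l])) by
          simp [pvStepA, hr']]
        rw [ih h bs (some (c ++ [l]))]
        simp [hr']

-- ===== VERDICT (by name: the statement is the Claim_ definition above) =====
theorem split_into_blocks_py_spec : Claim_equal_split_into_blocks_py := by
  intro ls _
  show split_into_blocks_py ls = split_into_blocks_py_alt ls
  unfold split_into_blocks_py split_into_blocks_py_alt
  rw [pvMainA ls [] [] none]
  simp
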